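-- pv_equiv track=rewrite | github.com/bpm-diag/DECMOL | new_metrics/neg_recall.py | edges_freq
-- ===== SOURCE A (Python) =====
-- def edges_freq(edges,log,k):
--     #computes the frequency of edges (used for Fitness)
--     freqs = dict()
--     for edge in edges:
--         #reobtaing the trace/subtrace corresponding to the edge
--         first_node,second_node = edge
--         if first_node == '-':
--             string = ['-']+list(second_node)
--         elif second_node == '-':
--             string = list(first_node)+['-']
--         else:
--             string = list(first_node)+[second_node[-1]]
--         #counting the number of times the string appears in the log (no matter if as trace or subtrace)
--         c = 0
--         str_len = len(string)
--         for trace in log: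
--             trace = ['-']+trace+['-']
--             for i in range(0,len(trace)-str_len+1):
--                 if string == trace[i:i+str_len]:
--                     c = c+1
--         freqs[edge]=c
--     return freqs
-- ===== SOURCE B (Python) =====
-- def ngrams(t, L):
--     return [tuple(t[i:i + L]) for i in range(len(t) - L + 1)]
--
-- def edges_freq(edges, log, k):
--     # one pass over the log counting all n-grams of the needed lengths, then per-edge lookup
--     pats = {}
--     for edge in edges:
--         first_node, second_node = edge
--         if first_node == '-':
--             p = ('-',) + tuple(second_node)
--         elif second_node == '-':
--             p = tuple(first_node) + ('-',)
--         else: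
--             p = tuple(first_node) + (second_node[-1],)
--         pats[edge] = p
--     lengths = list(dict.fromkeys(len(p) for p in pats.values()))
--     cnt = {}
--     for trace in log:
--         t = ['-'] + trace + ['-']
--         for L in lengths:
--             for g in ngrams(t, L):
--                 cnt[g] = cnt.get(g, 0) + 1
--     return {e: cnt.get(p, 0) for e, p in pats.items()}
-- ===== Notes on version B (the rewrite author's own statement) =====
-- stated objective: faster
-- what changed: Instead of rescanning the whole log once per edge (nested edge x trace x position loops), B counts all n-grams of the needed pattern lengths in a single pass over the log into a dictionary and then answers each edge by one lookup.
import Mathlib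
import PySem

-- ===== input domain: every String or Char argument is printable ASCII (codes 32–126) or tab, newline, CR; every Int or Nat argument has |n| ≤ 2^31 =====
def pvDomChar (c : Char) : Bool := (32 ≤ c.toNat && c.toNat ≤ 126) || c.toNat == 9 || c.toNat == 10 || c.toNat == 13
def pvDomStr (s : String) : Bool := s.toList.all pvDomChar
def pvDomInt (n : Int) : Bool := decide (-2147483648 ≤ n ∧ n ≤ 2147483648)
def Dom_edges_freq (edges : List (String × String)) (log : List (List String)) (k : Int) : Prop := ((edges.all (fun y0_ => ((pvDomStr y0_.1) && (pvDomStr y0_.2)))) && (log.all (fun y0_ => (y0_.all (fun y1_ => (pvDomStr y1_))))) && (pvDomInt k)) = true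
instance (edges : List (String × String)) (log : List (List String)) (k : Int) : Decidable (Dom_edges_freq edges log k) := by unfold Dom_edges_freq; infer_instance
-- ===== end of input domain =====

-- B replaces A's per-edge rescan of the log by one pass counting all n-grams of the needed
-- lengths into a dictionary, then a lookup per edge (objective: faster).


-- shared by both ports: a 1-character Python string (list(s) element / s[-1])
def pvStr1 (c : Char) : String := String.ofList [c]

-- ===== PORT A =====
-- A's pattern for an edge: ['-']+list(s) / list(f)+['-'] / list(f)+[s[-1]]
-- (s[-1] via pyGetD; the IndexError case s = "" is excluded by Pre_)
def pvPatA (f s : String) : List String :=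
  if f = "-" then "-" :: s.toList.map pvStr1
  else if s = "-" then f.toList.map pvStr1 ++ ["-"]
  else f.toList.map pvStr1 ++ [pvStr1 (PySem.List.pyGetD s.toList (-1) ' ')]

-- A's nested counting loops: for trace in log: for i in range(0, len(trace)-str_len+1): …
def pvCountA (p : List String) (log : List (List String)) : Int :=
  log.foldl (fun c trace =>
    let t := "-" :: trace ++ ["-"]
    (PySem.List.pyRange 0 ((t.length : Int) - (p.length : Int) + 1)).foldl
      (fun c i =>
        if p = PySem.List.slice t (some i) (some (i + (p.length : Int))) then c + 1 else c) c) 0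

def edges_freq (edges : List (String × String)) (log : List (List String)) (k : Int) : List (String × String × Int) :=
  (edges.foldl (fun d e => d.insert e (pvCountA (pvPatA e.1 e.2) log))
    (PySem.Dict.empty : PySem.Dict (String × String) Int)).items.map (fun q => (q.1.1, q.1.2, q.2))

-- ===== PORT B =====
-- B's pattern for an edge (tuple in the Python; same branch logic as A's)
def pvPatB (f s : String) : List String :=
  if f = "-" then "-" :: s.toList.map pvStr1
  else if s = "-" then f.toList.map pvStr1 ++ ["-"]
  else f.toList.map pvStr1 ++ [pvStr1 (PySem.List.pyGetD s.toList (-1) ' ')]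

-- ngrams(t, L) = [tuple(t[i:i+L]) for i in range(len(t)-L+1)]
def pvNgrams (t : List String) (L : Nat) : List (List String) :=
  (List.range (t.length + 1 - L)).map (fun i => (t.drop i).take L)

def edges_freq_alt (edges : List (String × String)) (log : List (List String)) (k : Int) : List (String × String × Int) :=
  let pats := edges.foldl (fun d e => d.insert e (pvPatB e.1 e.2))
    (PySem.Dict.empty : PySem.Dict (String × String) (List String))
  let lengths := PySem.List.dedup (pats.values.map List.length)
  let cnt := log.foldl (fun c trace =>
      let t := "-" :: trace ++ ["-"]
      lengths.foldl (fun c L =>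
        (pvNgrams t L).foldl (fun c g => c.insert g (c.getD g 0 + 1)) c) c)
    (PySem.Dict.empty : PySem.Dict (List String) Int)
  pats.items.map (fun q => (q.1.1, q.1.2, cnt.getD q.2 0))

-- ===== PRECONDITION & SPEC =====
-- Pre_ excludes exactly the edges (f, s) with f ≠ '-', s ≠ '-' and s = '', on which A's
-- second_node[-1] raises IndexError (B's s[-1] raises there too).
def Pre_edges_freq (edges : List (String × String)) (log : List (List String)) (k : Int) : Prop :=
  ∀ e ∈ edges, e.1 = "-" ∨ e.2 = "-" ∨ e.2 ≠ ""
instance (edges : List (String × String)) (log : List (List String)) (k : Int) : Decidable (Pre_edges_freq edges log k) := by unfold Pre_edges_freq; infer_instance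

def pvWitness_edges_freq : (List (String × String)) × List (List String) × Int :=
  ([("a", "b"), ("-", "ab"), ("ab", "-")], [["a", "b", "ab"], ["b"]], 0)

def Spec_edges_freq (edges : List (String × String)) (log : List (List String)) (k : Int) (out : List (String × String × Int)) : Prop := out = edges_freq_alt edges log k
instance (edges : List (String × String)) (log : List (List String)) (k : Int) (out : List (String × String × Int)) : Decidable (Spec_edges_freq edges log k out) := by unfold Spec_edges_freq; infer_instance

-- ===== CLAIM (what is proved, stated in full; the proofs are below) =====
def Claim_equal_edges_freq : Prop := ∀ (edges : List (String × String)) (log : List (List String)) (k : Int), Dom_edges_freq edges log k → Pre_edges_freq edges log k → Spec_edges_freq edges log k (edges_freq edges log k)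

-- ===== LEMMAS AND PROOFS =====

-- the two Pythons build the same pattern for an edge
theorem pvPat_eq (f s : String) : pvPatA f s = pvPatB f s := rfl

-- every n-gram produced for length L has length exactly L
theorem pvNgrams_length {t : List String} {L : Nat} {g : List String}
    (h : g ∈ pvNgrams t L) : g.length = L := by
  unfold pvNgrams at h
  simp only [List.mem_map, List.mem_range] at h
  obtain ⟨i, hi, rfl⟩ := h
  simp only [List.length_take, List.length_drop]
  omega

-- A's inner loop over positions counts p among the n-grams of length p.length
theorem pvCountA_inner (p : List String) (t : List String) (c : Int) :
    (PySem.List.pyRange 0 ((t.length : Int) - (p.length : Int) + 1)).foldl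
      (fun c i =>
        if p = PySem.List.slice t (some i) (some (i + (p.length : Int))) then c + 1 else c) c
    = c + ((pvNgrams t p.length).count p : Int) := by
  have hn : (t.length : Int) - (p.length : Int) + 1 = ((t.length + 1 - p.length : Nat) : Int) ∨
      ((t.length : Int) - (p.length : Int) + 1 ≤ 0 ∧ t.length + 1 - p.length = 0) := by omega
  rcases hn with hn | ⟨hn, hz⟩
  · rw [hn, PySem.List.pyRange_zero_natCast, List.foldl_map]
    have hfun : (fun (c : Int) (i : Nat) =>
          if p = PySem.List.slice t (some (i : Int)) (some ((i : Int) + (p.length : Int)))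
          then c + 1 else c)
        = (fun (c : Int) (i : Nat) =>
          if (((t.drop i).take p.length == p) = true) then c + 1 else c) := by
      funext c i
      rw [PySem.List.slice_natCast_add]
      by_cases h : p = (t.drop i).take p.length
      · rw [if_pos h, if_pos (beq_iff_eq.mpr h.symm)]
      · rw [if_neg h, if_neg (fun hb => h (beq_iff_eq.mp hb).symm)]
    rw [hfun, ← PySem.List.foldl_beq_add_one (pvNgrams t p.length) p c]
    unfold pvNgrams
    rw [List.foldl_map]
  · have hempty : PySem.List.pyRange 0 ((t.length : Int) - (p.length : Int) + 1) = [] := by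
      rw [List.eq_nil_iff_forall_not_mem]
      intro x hx
      have := PySem.List.mem_pyRange_one.mp hx
      omega
    rw [hempty]
    unfold pvNgrams
    rw [hz]
    simp
-- A's whole count = sum over traces of the per-trace n-gram count of p
theorem pvCountA_eq_sum (p : List String) (log : List (List String)) :
    pvCountA p log
    = (log.map (fun trace => (((pvNgrams ("-" :: trace ++ ["-"]) p.length).count p : Int)))).sum := by
  unfold pvCountA
  suffices h : ∀ (c : Int), log.foldl (fun c trace =>
      let t := "-" :: trace ++ ["-"]
      (PySem.List.pyRange 0 ((t.length : Int) - (p.length : Int) + 1)).foldl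
        (fun c i =>
          if p = PySem.List.slice t (some i) (some (i + (p.length : Int))) then c + 1 else c) c) c
      = c + (log.map (fun trace => (((pvNgrams ("-" :: trace ++ ["-"]) p.length).count p : Int)))).sum by
    simpa using h 0
  induction log with
  | nil => intro c; simp
  | cons tr rest ih =>
      intro c
      simp only [List.foldl_cons, List.map_cons, List.sum_cons]
      rw [ih, pvCountA_inner]
      ring

-- B's per-trace step adds, at key p, the n-gram counts of p for every length in `lengths`
theorem pvCnt_lengths (p : List String) (t : List String) :
    ∀ (lengths : List Nat) (c : PySem.Dict (List String) Int),
    (lengths.foldl (fun c L =>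
        (pvNgrams t L).foldl (fun c g => c.insert g (c.getD g 0 + 1)) c) c).getD p 0
    = c.getD p 0 + (lengths.map (fun L => (((pvNgrams t L).count p : Int)))).sum := by
  intro lengths
  induction lengths with
  | nil => intro c; simp
  | cons L rest ih =>
      intro c
      simp only [List.foldl_cons, List.map_cons, List.sum_cons]
      rw [ih, PySem.Dict.getD_foldl_insert_add_one]
      ring

-- B's counter at key p = sum over traces and lengths of the n-gram counts of p
theorem pvCnt_eq_sum (p : List String) (lengths : List Nat) (log : List (List String)) :
    ∀ (c : PySem.Dict (List String) Int),
    (log.foldl (fun c trace =>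
      let t := "-" :: trace ++ ["-"]
      lengths.foldl (fun c L =>
        (pvNgrams t L).foldl (fun c g => c.insert g (c.getD g 0 + 1)) c) c) c).getD p 0
    = c.getD p 0 + (log.map (fun trace =>
        ((lengths.map (fun L => (((pvNgrams ("-" :: trace ++ ["-"]) L).count p : Int)))).sum))).sum := by
  induction log with
  | nil => intro c; simp
  | cons tr rest ih =>
      intro c
      simp only [List.foldl_cons, List.map_cons, List.sum_cons]
      rw [ih, pvCnt_lengths]
      ring

-- for a Nodup length list containing p.length, only the L = p.length term contributes
theorem pvSum_lengths (p : List String) (t : List String) :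
    ∀ (lengths : List Nat), lengths.Nodup → p.length ∈ lengths →
    (lengths.map (fun L => (((pvNgrams t L).count p : Int)))).sum
    = ((pvNgrams t p.length).count p : Int) := by
  intro lengths
  induction lengths with
  | nil => intro _ h; exact absurd h (List.not_mem_nil)
  | cons L rest ih =>
      intro hnd hmem
      have hzero : ∀ (L' : Nat), L' ≠ p.length → (pvNgrams t L').count p = 0 := by
        intro L' hne
        rw [List.count_eq_zero]
        intro hp
        exact hne ((pvNgrams_length hp).symm)
      simp only [List.map_cons, List.sum_cons]
      rcases List.mem_cons.mp hmem with h | h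
      · -- L = p.length; the rest contributes 0
        have hrest : (rest.map (fun L => (((pvNgrams t L).count p : Int)))).sum = 0 := by
          apply List.sum_eq_zero
          intro x hx
          simp only [List.mem_map] at hx
          obtain ⟨L', hL', rfl⟩ := hx
          have : L' ≠ p.length := by
            intro hE; subst hE; subst h; exact (List.nodup_cons.mp hnd).1 hL'
          rw [hzero L' this]; rfl
        rw [hrest, h]; ring
  -- L ≠ p.length: head contributes 0
      · have hLne : L ≠ p.length := by
          intro hE; subst hE; exact (List.nodup_cons.mp hnd).1 h
        rw [hzero L hLne, ih (List.nodup_cons.mp hnd).2 h]; simp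

-- building two dicts over the same keys with key-determined values: items align
theorem pvItems_align {ν μ : Type} (f : (String × String) → ν) (g : (String × String) → μ) :
    ∀ (edges : List (String × String)) (d1 : PySem.Dict (String × String) ν)
      (d2 : PySem.Dict (String × String) μ),
      d1.items = d2.items.map (fun q => (q.1, f q.1)) →
      (edges.foldl (fun d e => d.insert e (f e)) d1).items
      = (edges.foldl (fun d e => d.insert e (g e)) d2).items.map (fun q => (q.1, f q.1)) := by
  intro edges
  induction edges with
  | nil => intro d1 d2 h; simpa using h
  | cons e rest ih =>
      intro d1 d2 h
      simp only [List.foldl_cons]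
      apply ih
      have hkeys : d1.keys = d2.keys := by
        show d1.items.map Prod.fst = d2.items.map Prod.fst
        rw [h, List.map_map]; rfl
      have hcont : d1.contains e = d2.contains e := by
        rw [PySem.Dict.contains_eq_decide_mem_keys, PySem.Dict.contains_eq_decide_mem_keys, hkeys]
      rw [PySem.Dict.items_insert, PySem.Dict.items_insert, hcont]
      by_cases hc : d2.contains e = true
      · rw [if_pos hc, if_pos hc, h, List.map_map, List.map_map]
        apply List.map_congr_left
        intro q _
        by_cases hq : q.1 = e
        · simp [hq]
        · simp [hq]
      · rw [if_neg hc, if_neg hc, h, List.map_append]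
        simp

-- every item of the pats dict carries the pattern of its key
theorem pvPats_inv : ∀ (edges : List (String × String)) (d : PySem.Dict (String × String) (List String)),
    (∀ q ∈ d.items, q.2 = pvPatB q.1.1 q.1.2) →
    ∀ q ∈ (edges.foldl (fun d e => d.insert e (pvPatB e.1 e.2)) d).items, q.2 = pvPatB q.1.1 q.1.2 := by
  intro edges
  induction edges with
  | nil => intro d h; exact h
  | cons e rest ih =>
      intro d h
      simp only [List.foldl_cons]
      apply ih
      intro q hq
      rcases (PySem.Dict.mem_items_insert _ _ _ _).mp hq with rfl | ⟨hq', _⟩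
      · rfl
      · exact h q hq'

-- ===== VERDICT (by name: the statement is the Claim_ definition above) =====
theorem edges_freq_spec : Claim_equal_edges_freq := by
  intro edges log k _ _
  show edges_freq edges log k = edges_freq_alt edges log k
  unfold edges_freq edges_freq_alt
  set pats := edges.foldl (fun d e => d.insert e (pvPatB e.1 e.2))
    (PySem.Dict.empty : PySem.Dict (String × String) (List String)) with hpats
  set lengths := PySem.List.dedup (pats.values.map List.length) with hlengths
  have halign := pvItems_align (fun e => pvCountA (pvPatA e.1 e.2) log) (fun e => pvPatB e.1 e.2)
    edges PySem.Dict.empty PySem.Dict.empty (by rfl)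
  rw [halign, List.map_map]
  apply List.map_congr_left
  intro q hq
  have hqpat : q.2 = pvPatB q.1.1 q.1.2 := pvPats_inv edges PySem.Dict.empty (by intro q h; simp [PySem.Dict.empty] at h) q hq
  have hmemlen : q.2.length ∈ lengths := by
    rw [hlengths, PySem.List.mem_dedup]
    apply List.mem_map_of_mem
    show q.2 ∈ pats.items.map Prod.snd
    exact List.mem_map_of_mem hq
  simp only [Function.comp]
  congr 1
  congr 1
  -- the counts agree
  rw [pvPat_eq, ← hqpat, pvCountA_eq_sum, pvCnt_eq_sum]
  rw [PySem.Dict.getD_empty]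
  rw [zero_add]
  apply congrArg
  apply List.map_congr_left
  intro tr _
  exact (pvSum_lengths q.2 _ lengths (PySem.List.nodup_dedup _) hmemlen).symm
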